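-- pv_equiv track=rewrite | github.com/xiaoqzhwhu/SAGraph | llm_simulation/influencer_selection.py | calculate_interaction_frequency
-- ===== SOURCE A (Python) =====
-- def calculate_interaction_frequency(static_data, dynamic_data):
--     # 回复用户数、回复评论数、被回复用户数、被回复评论数、回复大V数、回复大V评论数、被回复大V数、被回复大V评论数；
--     frequency_dict = {}
--     frequency_by_dict = {}
--     for user_id in dynamic_data:
--         for item in dynamic_data[user_id]:
--             interact_id = str(item["interact_id"])
--             if interact_id not in frequency_by_dict:
--                 frequency_by_dict.setdefault(interact_id, {user_id: 1})
--             else: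
--                 if user_id in frequency_by_dict[interact_id]:
--                     frequency_by_dict[interact_id][user_id] += 1
--                 else:
--                     frequency_by_dict[interact_id].setdefault(user_id, 1)
--     for user_id in static_data:
--         interact_user_cnt = 0
--         interact_comment_cnt = 0
--         interact_vip_cnt = 0
--         interact_vip_comment_cnt = 0
--         interact_by_user_cnt = 0
--         interact_by_comment_cnt = 0
--         interact_by_vip_cnt = 0
--         interact_by_vip_comment_cnt = 0
--         if user_id in dynamic_data:
--             interact_user_cnt = len(set([i["interact_id"] for i in dynamic_data[user_id]]))
--             interact_comment_cnt = len(dynamic_data[user_id])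
--             interact_vip_cnt = len(set([i["interact_id"] for i in dynamic_data[user_id] if static_data[str(i["interact_id"])]["user_followers"] > 100000]))
--             interact_vip_comment_cnt = len([i["interact_id"] for i in dynamic_data[user_id] if static_data[str(i["interact_id"])]["user_followers"] > 100000])
--         if user_id in frequency_by_dict:
--             interact_by_user_cnt = len(frequency_by_dict[user_id])
--             interact_by_comment_cnt = sum([frequency_by_dict[user_id][u] for u in frequency_by_dict[user_id]])
--             interact_by_vip_cnt = len([u for u in frequency_by_dict[user_id] if static_data[user_id]["user_followers"] > 100000])
--             interact_by_vip_comment_cnt = sum([frequency_by_dict[user_id][u] for u in frequency_by_dict[user_id] if static_data[user_id]["user_followers"] > 100000])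
--         frequency_dict.setdefault(user_id, [interact_user_cnt, interact_comment_cnt, interact_vip_cnt, interact_vip_comment_cnt, interact_by_user_cnt, interact_by_comment_cnt, interact_by_vip_cnt, interact_by_vip_comment_cnt])
--     return frequency_dict
-- ===== SOURCE B (Python) =====
-- def calculate_interaction_frequency(static_data, dynamic_data):
--     # Index-free direct scan: no frequency_by_dict is built at all; for each static
--     # user the incoming-reply stats are counted by scanning dynamic_data directly,
--     # with the constant vip condition checked once per user.
--     result = {}
--     for user_id in static_data:
--         seen = set()
--         comments = 0
--         vip_seen = set()
--         vip_comments = 0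
--         if user_id in dynamic_data:
--             for i in dynamic_data[user_id]:
--                 iid = i["interact_id"]
--                 seen.add(iid)
--                 comments += 1
--                 if static_data[str(iid)]["user_followers"] > 100000:
--                     vip_seen.add(iid)
--                     vip_comments += 1
--         by_users = 0
--         by_comments = 0
--         for src in dynamic_data:
--             hits = sum(1 for i in dynamic_data[src] if str(i["interact_id"]) == user_id)
--             if hits != 0:
--                 by_users += 1
--                 by_comments += hits
--         if by_comments != 0 and static_data[user_id]["user_followers"] > 100000:
--             by_vip_users, by_vip_comments = by_users, by_comments
--         else:
--             by_vip_users, by_vip_comments = 0, 0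
--         result[user_id] = [len(seen), comments, len(vip_seen), vip_comments,
--                            by_users, by_comments, by_vip_users, by_vip_comments]
--     return result
-- ===== Notes on version B (the rewrite author's own statement) =====
-- stated objective: alternative
-- what changed: Drops A's precomputed nested reverse-index dict entirely: B computes the incoming-reply stats for each static user by a direct scan over dynamic_data (counting sources with at least one hit and total hits), fuses the four forward comprehensions into one loop, and gates the constant vip condition once.
import Mathlib
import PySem

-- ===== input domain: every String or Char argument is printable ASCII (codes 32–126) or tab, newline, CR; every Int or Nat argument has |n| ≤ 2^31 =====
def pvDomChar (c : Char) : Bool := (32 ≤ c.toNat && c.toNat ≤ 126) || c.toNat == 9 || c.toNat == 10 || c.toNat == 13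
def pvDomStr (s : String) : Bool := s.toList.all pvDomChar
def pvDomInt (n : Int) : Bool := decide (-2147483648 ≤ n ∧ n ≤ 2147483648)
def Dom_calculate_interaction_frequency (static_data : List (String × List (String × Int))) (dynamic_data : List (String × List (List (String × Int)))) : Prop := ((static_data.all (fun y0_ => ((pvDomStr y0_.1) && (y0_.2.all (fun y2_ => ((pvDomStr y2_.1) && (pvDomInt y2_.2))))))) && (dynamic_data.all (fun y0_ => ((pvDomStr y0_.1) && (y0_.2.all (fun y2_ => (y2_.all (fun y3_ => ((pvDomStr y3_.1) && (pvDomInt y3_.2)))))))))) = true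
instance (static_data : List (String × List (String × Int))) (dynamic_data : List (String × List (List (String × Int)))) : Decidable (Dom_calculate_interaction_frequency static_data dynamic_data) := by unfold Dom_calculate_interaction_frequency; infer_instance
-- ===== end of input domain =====

-- B drops A's precomputed nested reverse-index dict entirely and counts each static user's
-- incoming replies by a direct scan over dynamic_data (objective: alternative, not faster).

-- shared parameter decoding (the arguments are Python dicts given as association lists)
def pvSD (static_data : List (String × List (String × Int))) : PySem.Dict String (PySem.Dict String Int) :=
  PySem.Dict.ofList (static_data.map (fun p => (p.1, PySem.Dict.ofList p.2)))
def pvDD (dynamic_data : List (String × List (List (String × Int)))) : PySem.Dict String (List (PySem.Dict String Int)) :=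
  PySem.Dict.ofList (dynamic_data.map (fun p => (p.1, p.2.map PySem.Dict.ofList)))
-- i["interact_id"] (key presence is guaranteed by Pre_; getD stands for the checked lookup)
def pvGid (item : PySem.Dict String Int) : Int := item.getD "interact_id" 0
-- static_data[key]["user_followers"] > 100000 (presence of the keys is guaranteed by Pre_)
def pvVipS (sd : PySem.Dict String (PySem.Dict String Int)) (key : String) : Bool :=
  decide ((sd.getD key PySem.Dict.empty).getD "user_followers" 0 > 100000)
-- static_data[str(iid)]["user_followers"] > 100000
def pvVip (sd : PySem.Dict String (PySem.Dict String Int)) (iid : Int) : Bool :=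
  pvVipS sd (PySem.Int.toStr iid)

-- ===== PORT A =====
-- one step of A's first loop: the nested frequency_by_dict update
def pvA_step (u : String) (fbd : PySem.Dict String (PySem.Dict String Int)) (item : PySem.Dict String Int) :
    PySem.Dict String (PySem.Dict String Int) :=
  let t := PySem.Int.toStr (pvGid item)
  if fbd.contains t = false then
    fbd.setdefault t (PySem.Dict.mk [(u, (1 : Int))])
  else
    let inner := fbd.getD t PySem.Dict.empty
    if inner.contains u then fbd.insert t (inner.insert u (inner.getD u 0 + 1))
    else fbd.insert t (inner.setdefault u 1)

-- the 8-element list A builds for one user of static_data (four comprehensions per block)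
def pvA_vals (sd : PySem.Dict String (PySem.Dict String Int))
    (dd : PySem.Dict String (List (PySem.Dict String Int)))
    (fbd : PySem.Dict String (PySem.Dict String Int)) (uid : String) : List Int :=
  let dyn : Int × Int × Int × Int :=
    if dd.contains uid then
      let items := dd.getD uid []
      (((PySem.Set.ofList (items.map (fun i => pvGid i))).length : Int),
       (items.length : Int),
       ((PySem.Set.ofList ((items.filter (fun i => pvVip sd (pvGid i))).map (fun i => pvGid i))).length : Int),
       ((items.filter (fun i => pvVip sd (pvGid i))).length : Int))
    else (0, 0, 0, 0)
  let byp : Int × Int × Int × Int :=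
    if fbd.contains uid then
      let inner := fbd.getD uid PySem.Dict.empty
      ((inner.size : Int),
       (inner.keys.map (fun u => inner.getD u 0)).sum,
       ((inner.keys.filter (fun _ => pvVipS sd uid)).length : Int),
       ((inner.keys.filter (fun _ => pvVipS sd uid)).map (fun u => inner.getD u 0)).sum)
    else (0, 0, 0, 0)
  [dyn.1, dyn.2.1, dyn.2.2.1, dyn.2.2.2, byp.1, byp.2.1, byp.2.2.1, byp.2.2.2]

def calculate_interaction_frequency (static_data : List (String × List (String × Int))) (dynamic_data : List (String × List (List (String × Int)))) : List (String × List Int) :=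
  let sd := pvSD static_data
  let dd := pvDD dynamic_data
  let fbd := dd.items.foldl (fun fbd p => (dd.getD p.1 []).foldl (pvA_step p.1) fbd) PySem.Dict.empty
  let freq := sd.items.foldl (fun out p => out.setdefault p.1 (pvA_vals sd dd fbd p.1)) PySem.Dict.empty
  freq.items

-- ===== PORT B =====
-- one step of B's fused forward loop: (seen, comments, vip_seen, vip_comments)
def pvB_dyn_step (sd : PySem.Dict String (PySem.Dict String Int))
    (st : PySem.Set Int × Int × PySem.Set Int × Int) (item : PySem.Dict String Int) :
    PySem.Set Int × Int × PySem.Set Int × Int :=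
  let iid := pvGid item
  let seen := PySem.Set.add st.1 iid
  let comments := st.2.1 + 1
  if pvVip sd iid then (seen, comments, PySem.Set.add st.2.2.1 iid, st.2.2.2 + 1)
  else (seen, comments, st.2.2.1, st.2.2.2)

-- hits = sum(1 for i in dynamic_data[src] if str(i["interact_id"]) == user_id)
def pvHits (dd : PySem.Dict String (List (PySem.Dict String Int))) (uid : String)
    (p : String × List (PySem.Dict String Int)) : Int :=
  (((dd.getD p.1 []).filter (fun i => PySem.Int.toStr (pvGid i) == uid)).length : Int)

-- one step of B's direct scan over dynamic_data: (by_users, by_comments)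
def pvB_by_step (dd : PySem.Dict String (List (PySem.Dict String Int))) (uid : String)
    (acc : Int × Int) (p : String × List (PySem.Dict String Int)) : Int × Int :=
  let hits := pvHits dd uid p
  if hits ≠ 0 then (acc.1 + 1, acc.2 + hits) else acc

-- the 8-element list B builds for one user: fused forward loop, direct scan, one vip gate
def pvB_vals (sd : PySem.Dict String (PySem.Dict String Int))
    (dd : PySem.Dict String (List (PySem.Dict String Int))) (uid : String) : List Int :=
  let st0 : PySem.Set Int × Int × PySem.Set Int × Int := (PySem.Set.empty, 0, PySem.Set.empty, 0)
  let st := if dd.contains uid then (dd.getD uid []).foldl (pvB_dyn_step sd) st0 else st0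
  let byp := dd.items.foldl (pvB_by_step dd uid) ((0 : Int), (0 : Int))
  let vips : Int × Int := if byp.2 ≠ 0 ∧ pvVipS sd uid = true then (byp.1, byp.2) else (0, 0)
  [((st.1.length : Int)), st.2.1, ((st.2.2.1.length : Int)), st.2.2.2,
   byp.1, byp.2, vips.1, vips.2]

def calculate_interaction_frequency_alt (static_data : List (String × List (String × Int))) (dynamic_data : List (String × List (List (String × Int)))) : List (String × List Int) :=
  let sd := pvSD static_data
  let dd := pvDD dynamic_data
  let result := sd.items.foldl (fun res p => res.insert p.1 (pvB_vals sd dd p.1)) PySem.Dict.empty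
  result.items

-- ===== PRECONDITION & SPEC =====
-- Pre_ excludes exactly the inputs on which A raises KeyError: an interaction item without the
-- "interact_id" key; a user present in both dicts one of whose items targets a user missing from
-- static_data or whose static entry lacks "user_followers"; and a static user who is some item's
-- target but whose static entry lacks "user_followers".
def Pre_calculate_interaction_frequency (static_data : List (String × List (String × Int))) (dynamic_data : List (String × List (List (String × Int)))) : Prop :=
  (∀ p ∈ (pvDD dynamic_data).items, ∀ item ∈ p.2,
     item.contains "interact_id" = true ∧
     ((pvSD static_data).contains p.1 = true →
        ((pvSD static_data).getD (PySem.Int.toStr (pvGid item)) PySem.Dict.empty).contains "user_followers" = true)) ∧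
  (∀ q ∈ (pvSD static_data).items,
     (∃ p ∈ (pvDD dynamic_data).items, ∃ item ∈ p.2, PySem.Int.toStr (pvGid item) = q.1) →
     q.2.contains "user_followers" = true)
instance (static_data : List (String × List (String × Int))) (dynamic_data : List (String × List (List (String × Int)))) : Decidable (Pre_calculate_interaction_frequency static_data dynamic_data) := by unfold Pre_calculate_interaction_frequency; infer_instance

def pvWitness_calculate_interaction_frequency : (List (String × List (String × Int))) × (List (String × List (List (String × Int)))) :=
  ([("1", [("user_followers", 200000)]), ("2", [("user_followers", 3)])],
   [("2", [[("interact_id", 1)], [("interact_id", 1)]])])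

def Spec_calculate_interaction_frequency (static_data : List (String × List (String × Int))) (dynamic_data : List (String × List (List (String × Int)))) (out : List (String × List Int)) : Prop := out = calculate_interaction_frequency_alt static_data dynamic_data
instance (static_data : List (String × List (String × Int))) (dynamic_data : List (String × List (List (String × Int)))) (out : List (String × List Int)) : Decidable (Spec_calculate_interaction_frequency static_data dynamic_data out) := by unfold Spec_calculate_interaction_frequency; infer_instance

-- ===== CLAIM (what is proved, stated in full; the proofs are below) =====
def Claim_equal_calculate_interaction_frequency : Prop := ∀ (static_data : List (String × List (String × Int))) (dynamic_data : List (String × List (List (String × Int)))), Dom_calculate_interaction_frequency static_data dynamic_data → Pre_calculate_interaction_frequency static_data dynamic_data → Spec_calculate_interaction_frequency static_data dynamic_data (calculate_interaction_frequency static_data dynamic_data)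

-- ===== LEMMAS AND PROOFS =====

-- A's three-branch update is one uniform "bump u's count at key t"
theorem pvA_step_eq (u : String) (fbd : PySem.Dict String (PySem.Dict String Int))
    (item : PySem.Dict String Int) :
    pvA_step u fbd item =
      fbd.insert (PySem.Int.toStr (pvGid item))
        ((fbd.getD (PySem.Int.toStr (pvGid item)) PySem.Dict.empty).insert u
          ((fbd.getD (PySem.Int.toStr (pvGid item)) PySem.Dict.empty).getD u 0 + 1)) := by
  simp only [pvA_step]
  set t := PySem.Int.toStr (pvGid item)
  split_ifs with h1 h2
  · rw [PySem.Dict.setdefault_of_not_contains _ _ h1,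
      PySem.Dict.getD_of_not_contains _ _ h1]
    apply congrArg
    apply PySem.Dict.ext
    rfl
  · rfl
  · have h2' : (fbd.getD t PySem.Dict.empty).contains u = false := by simpa using h2
    rw [PySem.Dict.setdefault_of_not_contains _ _ h2',
      PySem.Dict.getD_of_not_contains _ _ h2']
    norm_num

-- per-user hit count (Nat form) of one source against a target t
def pvCnt (items : List (PySem.Dict String Int)) (t : String) : Nat :=
  (items.filter (fun i => PySem.Int.toStr (pvGid i) == t)).length

-- folding one source's items bumps u's count at each hit target by its hit count
theorem pvA_fold_items (u : String) (items : List (PySem.Dict String Int)) :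
    ∀ (fbd : PySem.Dict String (PySem.Dict String Int)) (t : String),
      ((items.foldl (pvA_step u) fbd).getD t PySem.Dict.empty =
        (if pvCnt items t = 0 then fbd.getD t PySem.Dict.empty
         else (fbd.getD t PySem.Dict.empty).insert u
                ((fbd.getD t PySem.Dict.empty).getD u 0 + (pvCnt items t : Int)))) ∧
      ((items.foldl (pvA_step u) fbd).contains t =
        (fbd.contains t || decide (pvCnt items t ≠ 0))) := by
  induction items with
  | nil => intro fbd t; simp [pvCnt]
  | cons i items ih =>
    intro fbd t
    rw [List.foldl_cons, pvA_step_eq]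
    set s := PySem.Int.toStr (pvGid i) with hs
    set inner := fbd.getD s PySem.Dict.empty with hinner
    set fbd1 := fbd.insert s (inner.insert u (inner.getD u 0 + 1)) with hfbd1
    obtain ⟨ihg, ihc⟩ := ih fbd1 t
    by_cases hts : t = s
    · subst hts
      have hcnt : pvCnt (i :: items) s = pvCnt items s + 1 := by
        simp [pvCnt, ← hs]
      have hg1 : fbd1.getD s PySem.Dict.empty = inner.insert u (inner.getD u 0 + 1) := by
        rw [hfbd1, PySem.Dict.getD_insert_self]
      have hc1 : fbd1.contains s = true := by
        rw [hfbd1, PySem.Dict.contains_insert_self]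
      constructor
      · rw [ihg, hg1, hcnt]
        by_cases hz : pvCnt items s = 0
        · simp [hz]; rfl
        · rw [if_neg hz, if_neg (by omega)]
          rw [PySem.Dict.insert_insert_self, PySem.Dict.getD_insert_self]
          congr 1
          push_cast
          ring
      · rw [ihc, hc1, hcnt]
        simp
    · have hcnt : pvCnt (i :: items) t = pvCnt items t := by
        have : ¬ (PySem.Int.toStr (pvGid i) == t) = true := by
          simp [← hs]; exact fun h => hts h.symm
        simp [pvCnt, this]
      have hg1 : fbd1.getD t PySem.Dict.empty = fbd.getD t PySem.Dict.empty := by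
        rw [hfbd1, PySem.Dict.getD_insert, if_neg hts]
      have hc1 : fbd1.contains t = fbd.contains t := by
        rw [hfbd1, PySem.Dict.contains_insert]
        simp [hts]
      rw [ihg, ihc, hcnt, hg1, hc1]
      exact ⟨rfl, rfl⟩

-- the whole first loop of A: the inner dict at t lists the hitting sources in order with their counts
theorem pvA_fold_users (dd : PySem.Dict String (List (PySem.Dict String Int))) :
    ∀ (ps : List (String × List (PySem.Dict String Int)))
      (fbd : PySem.Dict String (PySem.Dict String Int)),
      (∀ p ∈ ps, ∀ t, (fbd.getD t PySem.Dict.empty).contains p.1 = false) →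
      (ps.map Prod.fst).Nodup →
      ∀ t,
      ((ps.foldl (fun fbd p => (dd.getD p.1 []).foldl (pvA_step p.1) fbd) fbd).getD t PySem.Dict.empty).items
        = (fbd.getD t PySem.Dict.empty).items ++
          ((ps.filter (fun p => decide (pvHits dd t p ≠ 0))).map (fun p => (p.1, pvHits dd t p))) ∧
      (ps.foldl (fun fbd p => (dd.getD p.1 []).foldl (pvA_step p.1) fbd) fbd).contains t
        = (fbd.contains t || decide ((ps.filter (fun p => decide (pvHits dd t p ≠ 0))) ≠ [])) := by
  intro ps
  induction ps with
  | nil => intro fbd _ _ t; simp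
  | cons p ps ih =>
    intro fbd hfresh hnd t
    rw [List.map_cons] at hnd
    rcases List.nodup_cons.mp hnd with ⟨hp, hnd'⟩
    set fbd1 := (dd.getD p.1 []).foldl (pvA_step p.1) fbd with hfbd1
    have hfreshp : ∀ t', (fbd.getD t' PySem.Dict.empty).contains p.1 = false :=
      hfresh p (List.mem_cons_self ..)
    have hhit : ∀ t', pvHits dd t' p = (pvCnt (dd.getD p.1 []) t' : Int) := fun _ => rfl
    have hhz : ∀ t', (pvHits dd t' p ≠ 0) ↔ (pvCnt (dd.getD p.1 []) t' ≠ 0) := by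
      intro t'; rw [hhit]; constructor <;> intro h <;> simpa using h
    have hg1' : ∀ t', (fbd1.getD t' PySem.Dict.empty).items =
        (fbd.getD t' PySem.Dict.empty).items ++
          (if pvCnt (dd.getD p.1 []) t' = 0 then [] else [(p.1, (pvCnt (dd.getD p.1 []) t' : Int))]) := by
      intro t'
      obtain ⟨hg, _⟩ := pvA_fold_items p.1 (dd.getD p.1 []) fbd t'
      rw [hg]
      by_cases hz : pvCnt (dd.getD p.1 []) t' = 0
      · simp [hz]
      · rw [if_neg hz, if_neg hz,
          PySem.Dict.items_insert_of_not_contains _ _ (hfreshp t'),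
          PySem.Dict.getD_of_not_contains _ _ (hfreshp t')]
        simp
    have hcont1 : ∀ t', fbd1.contains t' =
        (fbd.contains t' || decide (pvCnt (dd.getD p.1 []) t' ≠ 0)) := by
      intro t'
      obtain ⟨_, hc⟩ := pvA_fold_items p.1 (dd.getD p.1 []) fbd t'
      exact hc
    have hfresh1 : ∀ q ∈ ps, ∀ t', (fbd1.getD t' PySem.Dict.empty).contains q.1 = false := by
      intro q hq t'
      have hqp : q.1 ≠ p.1 := fun h => hp (h ▸ List.mem_map_of_mem hq)
      obtain ⟨hg, _⟩ := pvA_fold_items p.1 (dd.getD p.1 []) fbd t'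
      rw [hg]
      by_cases hz : pvCnt (dd.getD p.1 []) t' = 0
      · rw [if_pos hz]; exact hfresh q (List.mem_cons_of_mem _ hq) t'
      · rw [if_neg hz, PySem.Dict.contains_insert]
        simp [hqp, hfresh q (List.mem_cons_of_mem _ hq) t']
    obtain ⟨ihg, ihc⟩ := ih fbd1 hfresh1 hnd' t
    constructor
    · rw [List.foldl_cons, ← hfbd1, ihg, hg1' t, List.filter_cons]
      by_cases hz : pvCnt (dd.getD p.1 []) t = 0
      · have h0 : pvHits dd t p = 0 := by rw [hhit t, hz]; rfl
        simp [h0, hz]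
      · have h0 : pvHits dd t p ≠ 0 := (hhz t).mpr hz
        simp [h0, hz, hhit]
    · rw [List.foldl_cons, ← hfbd1, ihc, hcont1 t, List.filter_cons]
      by_cases hz : pvCnt (dd.getD p.1 []) t = 0
      · have h0 : pvHits dd t p = 0 := by rw [hhit t, hz]; rfl
        rw [if_neg (by simp [h0])]
        simp [hz]
      · have h0 : pvHits dd t p ≠ 0 := (hhz t).mpr hz
        simp [hz, h0]

-- closed form of B's direct scan
theorem pvB_by_loop (dd : PySem.Dict String (List (PySem.Dict String Int))) (uid : String) :
    ∀ (l : List (String × List (PySem.Dict String Int))) (acc : Int × Int),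
      l.foldl (pvB_by_step dd uid) acc =
        (acc.1 + ((l.filter (fun p => decide (pvHits dd uid p ≠ 0))).length : Int),
         acc.2 + ((l.filter (fun p => decide (pvHits dd uid p ≠ 0))).map (fun p => pvHits dd uid p)).sum) := by
  intro l
  induction l with
  | nil => intro acc; simp
  | cons p l ih =>
    intro acc
    rw [List.foldl_cons, List.filter_cons]
    by_cases h : pvHits dd uid p ≠ 0
    · rw [if_pos (by simp [h])]
      simp only [pvB_by_step, if_pos h, ih, List.length_cons, List.map_cons, List.sum_cons]
      rw [Prod.mk.injEq]
      exact ⟨by push_cast; ring, by ring⟩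
    · rw [if_neg (by simp [not_not.mp h])]
      simp only [pvB_by_step, if_neg h, ih]

-- closed form of B's fused forward loop
theorem pvDyn_loop (sd : PySem.Dict String (PySem.Dict String Int))
    (items : List (PySem.Dict String Int)) :
    ∀ (s vs : PySem.Set Int) (c vc : Int),
    items.foldl (pvB_dyn_step sd) (s, c, vs, vc) =
      (PySem.Set.update s (items.map pvGid), c + (items.length : Int),
       PySem.Set.update vs ((items.filter (fun i => pvVip sd (pvGid i))).map pvGid),
       vc + ((items.filter (fun i => pvVip sd (pvGid i))).length : Int)) := by
  induction items with
  | nil => intro s vs c vc; simp [PySem.Set.update_nil]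
  | cons i items ih =>
    intro s vs c vc
    by_cases hv : pvVip sd (pvGid i)
    · simp only [List.foldl_cons, pvB_dyn_step, hv, List.filter_cons, List.map_cons,
        List.length_cons, ih, PySem.Set.update_cons]
      norm_num
      refine ⟨by ring, by ring⟩
    · simp only [List.foldl_cons, pvB_dyn_step, List.filter_cons, hv, List.map_cons,
        List.length_cons, ih, PySem.Set.update_cons]
      norm_num
      ring

-- a fold of setdefaults over fresh distinct keys appends its pairs
theorem pvFold_setdefault_items {b : Type} (l : List (String × b)) (v : (String × b) → List Int) :
    ∀ (out : PySem.Dict String (List Int)),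
      (∀ p ∈ l, out.contains p.1 = false) → (l.map Prod.fst).Nodup →
      (l.foldl (fun o p => o.setdefault p.1 (v p)) out).items
        = out.items ++ l.map (fun p => (p.1, v p)) := by
  induction l with
  | nil => intro out _ _; simp
  | cons p l ih =>
    intro out hfresh hnd
    rw [List.map_cons] at hnd
    rcases List.nodup_cons.mp hnd with ⟨hp, hl⟩
    have h1 : out.contains p.1 = false := hfresh p (List.mem_cons_self ..)
    have hstep : out.setdefault p.1 (v p) = out.insert p.1 (v p) :=
      PySem.Dict.setdefault_of_not_contains _ _ h1
    have hfresh' : ∀ q ∈ l, (out.insert p.1 (v p)).contains q.1 = false := by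
      intro q hq
      rw [PySem.Dict.contains_insert]
      have : q.1 ≠ p.1 := by
        intro h
        exact hp (h ▸ List.mem_map_of_mem hq)
      simp [this, hfresh q (List.mem_cons_of_mem _ hq)]
    simp only [List.foldl_cons, hstep, ih _ hfresh' hl,
      PySem.Dict.items_insert_of_not_contains _ _ h1]
    simp

-- the two per-user value lists agree
theorem pvVals_eq (sd : PySem.Dict String (PySem.Dict String Int))
    (dd : PySem.Dict String (List (PySem.Dict String Int)))
    (hnd : dd.keys.Nodup) (uid : String) :
    pvA_vals sd dd
      (dd.items.foldl (fun fbd p => (dd.getD p.1 []).foldl (pvA_step p.1) fbd) PySem.Dict.empty) uid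
      = pvB_vals sd dd uid := by
  obtain ⟨hitems, hcont⟩ := pvA_fold_users dd dd.items PySem.Dict.empty
    (fun p _ t => by simp) (by exact hnd) uid
  set F := dd.items.foldl (fun fbd p => (dd.getD p.1 []).foldl (pvA_step p.1) fbd) PySem.Dict.empty with hF
  set Lf := dd.items.filter (fun p => decide (pvHits dd uid p ≠ 0)) with hLf
  have eit : (PySem.Dict.empty : PySem.Dict String Int).items = [] := rfl
  have ect : (PySem.Dict.empty : PySem.Dict String (PySem.Dict String Int)).contains uid = false := rfl
  simp only [PySem.Dict.getD_empty, eit, ect, List.nil_append, Bool.false_or] at hitems hcont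
  have hkeys : (F.getD uid PySem.Dict.empty).keys = Lf.map Prod.fst := by
    simp only [PySem.Dict.keys, hitems, List.map_map]
    rfl
  have hvals : (F.getD uid PySem.Dict.empty).values = Lf.map (fun p => pvHits dd uid p) := by
    simp only [PySem.Dict.values, hitems, List.map_map]
    rfl
  have hsize : ((F.getD uid PySem.Dict.empty).size : Int) = (Lf.length : Int) := by
    simp only [PySem.Dict.size, hitems, List.length_map]
  have hknd : (F.getD uid PySem.Dict.empty).keys.Nodup := by
    rw [hkeys]
    exact (List.Sublist.map Prod.fst List.filter_sublist).nodup hnd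
  have hsum : ((F.getD uid PySem.Dict.empty).keys.map
      (fun u => (F.getD uid PySem.Dict.empty).getD u 0)).sum
      = (Lf.map (fun p => pvHits dd uid p)).sum := by
    rw [← PySem.Dict.values_eq_map_keys _ hknd 0, hvals]
  have hby : dd.items.foldl (pvB_by_step dd uid) ((0 : Int), (0 : Int)) =
      ((Lf.length : Int), (Lf.map (fun p => pvHits dd uid p)).sum) := by
    rw [pvB_by_loop]; simp [hLf]
  have hpos : ∀ x ∈ Lf.map (fun p => pvHits dd uid p), 0 < x := by
    intro x hx
    rcases List.mem_map.mp hx with ⟨p, hp, hx⟩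
    have h2 := (List.mem_filter.mp hp).2
    subst hx
    simp only [pvHits, decide_eq_true_eq] at h2 ⊢
    omega
  have hgate : ((Lf.map (fun p => pvHits dd uid p)).sum ≠ 0) ↔ Lf ≠ [] := by
    constructor
    · intro h hnil; rw [hnil] at h; simp at h
    · intro h
      have : 0 < (Lf.map (fun p => pvHits dd uid p)).sum :=
        List.sum_pos _ hpos (by simpa using h)
      omega
  have hdyn : (if dd.contains uid then
        (dd.getD uid []).foldl (pvB_dyn_step sd)
          ((PySem.Set.empty : PySem.Set Int), (0 : Int), (PySem.Set.empty : PySem.Set Int), (0 : Int))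
      else ((PySem.Set.empty : PySem.Set Int), (0 : Int), (PySem.Set.empty : PySem.Set Int), (0 : Int))) =
      (if dd.contains uid then
        (PySem.Set.ofList ((dd.getD uid []).map (fun i => pvGid i)),
         ((dd.getD uid []).length : Int),
         PySem.Set.ofList (((dd.getD uid []).filter (fun i => pvVip sd (pvGid i))).map (fun i => pvGid i)),
         (((dd.getD uid []).filter (fun i => pvVip sd (pvGid i))).length : Int))
      else (PySem.Set.empty, 0, PySem.Set.empty, 0)) := by
    by_cases hdd : dd.contains uid
    · rw [if_pos hdd, if_pos hdd, pvDyn_loop]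
      simp [PySem.Set.update_nil_left]
    · rw [if_neg hdd, if_neg hdd]
  -- assemble the two 8-lists
  simp only [pvA_vals, pvB_vals, hdyn, hby, hcont, hsize, hsum, hkeys]
  by_cases hdd : dd.contains uid <;> by_cases hnil : Lf = [] <;>
    by_cases hv : pvVipS sd uid = true <;>
    first
      | (simp [hdd, hnil, hv]; done)
      | (have hsne : (Lf.map (fun p => pvHits dd uid p)).sum ≠ 0 := hgate.mpr hnil
         have hsum' : (Lf.map ((fun u => (F.getD uid PySem.Dict.empty).getD u 0) ∘ Prod.fst)).sum
             = (Lf.map (fun p => pvHits dd uid p)).sum := by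
           rw [← List.map_map, ← hkeys]; exact hsum
         simp [hdd, hnil, hv, hsum, hsum', hsize, hkeys]
         try rw [if_neg hsne]
         try simp [hsum']
         done)

-- ===== VERDICT (by name: the statement is the Claim_ definition above) =====
theorem calculate_interaction_frequency_spec : Claim_equal_calculate_interaction_frequency := by
  intro static_data dynamic_data _ _
  unfold Spec_calculate_interaction_frequency
  simp only [calculate_interaction_frequency, calculate_interaction_frequency_alt]
  have hndd : (pvDD dynamic_data).keys.Nodup := by
    have := PySem.Dict.nodup_keys_ofList (dynamic_data.map (fun p => (p.1, p.2.map PySem.Dict.ofList)))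
    simp only [pvDD]; exact this
  have hndk : ((pvSD static_data).items.map Prod.fst).Nodup := by
    have := PySem.Dict.nodup_keys_ofList (static_data.map (fun p => (p.1, PySem.Dict.ofList p.2)))
    simpa [pvSD, PySem.Dict.keys] using this
  rw [pvFold_setdefault_items (pvSD static_data).items _ PySem.Dict.empty
        (fun p _ => PySem.Dict.contains_empty p.1) hndk,
      PySem.Dict.items_foldl_insert_fresh (pvSD static_data).items (fun p => p.1) _ PySem.Dict.empty
        (fun a _ => PySem.Dict.contains_empty a.1) hndk]
  apply congrArg (PySem.Dict.empty.items ++ ·)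
  apply List.map_congr_left
  intro p _
  rw [pvVals_eq _ _ hndd p.1]
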